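-- pv_equiv track=rewrite | github.com/simplecampus/sch-client | sch_client.py | prepare_query
-- ===== SOURCE A (Python) =====
-- def prepare_query(query, params):
--     param_vals = []
--     start = 0
--     while True:
--         start = query.find('$%$', start)
--         if start == -1: break
--         end = query.find('$%$', start + 3)
--         key = query[start + 3:end]
--         if key not in params:
--             raise Exception("key '" + key + "' from SQL not found in input parameters")
--         param_vals.append(params[key])
--         query = query[:start] + '?' + query[end + 3:]
--     return query, param_vals
-- ===== SOURCE B (Python) =====
-- def prepare_query(query, params):
--     segments = query.split('$%$')
--     if len(segments) % 2 == 0: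
--         raise Exception("unmatched '$%$' delimiter in query")
--     param_vals = []
--     parts = [segments[0]]
--     for i in range(1, len(segments), 2):
--         key = segments[i]
--         if key not in params:
--             raise Exception("key '" + key + "' from SQL not found in input parameters")
--         param_vals.append(params[key])
--         parts.append('?' + segments[i + 1])
--     return ''.join(parts), param_vals
-- ===== Notes on version B (the rewrite author's own statement) =====
-- stated objective: simpler
-- what changed: Replaces A's repeated find-and-splice rewriting of the query string (re-scanning the spliced string each iteration) by a single split on the '$%$' delimiter followed by one linear rebuild over the odd/even segments.
-- outside the precondition, e.g. on prepare_query('$%$', {'': 7}): A returns ('?$', [7]), B raises Exception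
import Mathlib
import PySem

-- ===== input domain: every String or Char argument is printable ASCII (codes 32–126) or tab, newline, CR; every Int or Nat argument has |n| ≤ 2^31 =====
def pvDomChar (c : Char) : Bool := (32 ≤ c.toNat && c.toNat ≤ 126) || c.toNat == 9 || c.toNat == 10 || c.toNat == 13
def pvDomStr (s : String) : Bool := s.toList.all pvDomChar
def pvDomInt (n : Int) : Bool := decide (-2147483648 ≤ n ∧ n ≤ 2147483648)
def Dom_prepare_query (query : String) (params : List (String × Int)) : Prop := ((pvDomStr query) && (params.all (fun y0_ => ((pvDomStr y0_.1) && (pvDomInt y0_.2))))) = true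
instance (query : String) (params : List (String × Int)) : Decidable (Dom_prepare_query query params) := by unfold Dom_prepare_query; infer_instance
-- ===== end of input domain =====

-- B replaces A's find-and-splice rewriting loop by one split on '$%$' plus a linear rebuild
-- over the segments (objective: simpler); Pre_ excludes malformed/key-missing queries.

-- ===== PORT A =====
-- A's while-loop: find '$%$' … '$%$', look the key up, splice in '?', rescan from the splice
-- point. Ported with a fuel bound (query length + 1 suffices for every run admitted by Pre_);
-- the fuel-exhausted branch and the `raise Exception(...)` branch are outside Pre_.
def prepQueryLoop (d : PySem.Dict String Int) : Nat → String → Int → List Int → String × List Int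
  | 0, q, _, acc => (q, acc)
  | fuel+1, q, start, acc =>
    let s := PySem.Str.findFrom q "$%$" start
    if s = -1 then (q, acc)
    else
      let e := PySem.Str.findFrom q "$%$" (s + 3)
      let key := PySem.Str.slice q (some (s + 3)) (some e)
      match d.get? key with
      | none => (q, acc)  -- raise Exception("key '" + key + "' from SQL not found in input parameters")
      | some v =>
        prepQueryLoop d fuel
          (PySem.Str.slice q none (some s) ++ "?" ++ PySem.Str.slice q (some (e + 3)) none)
          s (acc ++ [v])

def prepare_query (query : String) (params : List (String × Int)) : String × List Int :=
  prepQueryLoop (PySem.Dict.ofList params) (query.toList.length + 1) query 0 []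

-- ===== PORT B =====
-- processes segments[1], segments[2], … two at a time, mirroring `for i in range(1, len, 2)`
def prepQueryAltGo (d : PySem.Dict String Int) : List String → List String × List Int
  | key :: seg :: rest =>
    match d.get? key with
    | none => ([], [])  -- raise Exception("key '" + key + "' from SQL not found in input parameters")
    | some v =>
      let (parts, vals) := prepQueryAltGo d rest
      (("?" ++ seg) :: parts, v :: vals)
  | _ => ([], [])

def prepare_query_alt (query : String) (params : List (String × Int)) : String × List Int :=
  match PySem.Str.split? query "$%$" with
  | none => ("", [])  -- unreachable: the separator "$%$" is non-empty
  | some segments =>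
    if segments.length % 2 = 0 then ("", [])  -- raise Exception("unmatched '$%$' delimiter in query")
    else
      match segments with
      | [] => ("", [])  -- unreachable: split never returns an empty list
      | s0 :: rest =>
        let (parts, vals) := prepQueryAltGo (PySem.Dict.ofList params) rest
        (PySem.Str.join "" (s0 :: parts), vals)

-- ===== PRECONDITION & SPEC =====
def pqSep : List Char := ['$', '%', '$']

-- Pre_ excludes (a) queries with an unmatched '$%$' delimiter (odd number of occurrences):
-- there A raises, loops forever, or returns an accidental end=-1 splice while B raises; and
-- (b) queries naming a key absent from params, on which both A and B raise an Exception.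
def Pre_prepare_query (query : String) (params : List (String × Int)) : Prop :=
  (PySem.Chars.splitOn query.toList pqSep).length % 2 = 1 ∧
  ∀ i < (PySem.Chars.splitOn query.toList pqSep).length, i % 2 = 1 →
    ((PySem.Dict.ofList params).get?
      (String.ofList ((PySem.Chars.splitOn query.toList pqSep).getD i []))).isSome = true

instance (query : String) (params : List (String × Int)) : Decidable (Pre_prepare_query query params) := by
  unfold Pre_prepare_query; infer_instance

def pvWitness_prepare_query : String × (List (String × Int)) :=
  ("select v from t where a = $%$x$%$", [("x", 5)])

def Spec_prepare_query (query : String) (params : List (String × Int)) (out : String × List Int) : Prop :=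
  out = prepare_query_alt query params
instance (query : String) (params : List (String × Int)) (out : String × List Int) : Decidable (Spec_prepare_query query params out) := by
  unfold Spec_prepare_query; infer_instance

-- ===== CLAIM (what is proved, stated in full; the proofs are below) =====
def Claim_equal_prepare_query : Prop := ∀ (query : String) (params : List (String × Int)), Dom_prepare_query query params → Pre_prepare_query query params → Spec_prepare_query query params (prepare_query query params)

-- ===== LEMMAS AND PROOFS =====

def rebuildC (d : PySem.Dict String Int) : List (List Char) → List Char × List Int
  | k :: s :: rest =>
    match d.get? (String.ofList k) with
    | none => ([], [])
    | some v =>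
      let (cs, vs) := rebuildC d rest
      ('?' :: (s ++ cs), v :: vs)
  | _ => ([], [])

theorem sep_prefix_iff (t : List Char) :
    pqSep <+: t ↔ t[0]? = some '$' ∧ t[1]? = some '%' ∧ t[2]? = some '$' := by
  constructor
  · rintro ⟨u, rfl⟩; simp [pqSep]
  · rintro ⟨h0, h1, h2⟩
    match t with
    | [] => simp at h0
    | [a] => simp at h1
    | [a, b] => simp at h2
    | a :: b :: c :: r =>
      simp only [List.getElem?_cons_zero, Option.some.injEq] at h0
      simp only [List.getElem?_cons_succ, List.getElem?_cons_zero, Option.some.injEq] at h1 h2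
      exact ⟨r, by simp [pqSep, h0, h1, h2]⟩

theorem go_nil (cur : List Char) (acc : List (List Char)) (fuel : Nat) :
    PySem.Chars.splitOn.go pqSep (fuel + 1) [] cur acc = (cur.reverse :: acc).reverse := by
  simp [PySem.Chars.splitOn.go]

theorem go_cons_noprefix (c : Char) (rest cur : List Char) (acc : List (List Char)) (fuel : Nat)
    (h : ¬ pqSep <+: (c :: rest)) :
    PySem.Chars.splitOn.go pqSep (fuel + 1) (c :: rest) cur acc
      = PySem.Chars.splitOn.go pqSep fuel rest (c :: cur) acc := by
  have hb : pqSep.isPrefixOf (c :: rest) = false := by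
    rw [← Bool.not_eq_true, List.isPrefixOf_iff_prefix]; exact h
  simp [PySem.Chars.splitOn.go, hb]

theorem go_prefix (c : Char) (rest cur : List Char) (acc : List (List Char)) (fuel : Nat)
    (h : pqSep <+: (c :: rest)) :
    PySem.Chars.splitOn.go pqSep (fuel + 1) (c :: rest) cur acc
      = PySem.Chars.splitOn.go pqSep fuel ((c :: rest).drop 3) [] (cur.reverse :: acc) := by
  have hb : pqSep.isPrefixOf (c :: rest) = true := List.isPrefixOf_iff_prefix.mpr h
  have h3 : pqSep.length = 3 := by simp [pqSep]
  simp [PySem.Chars.splitOn.go, hb, h3]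

def splX (l : List Char) : List (List Char) :=
  if h : 0 ≤ PySem.Chars.find l pqSep then
    l.take (PySem.Chars.find l pqSep).toNat ::
      splX (l.drop ((PySem.Chars.find l pqSep).toNat + 3))
  else [l]
termination_by l.length
decreasing_by
  have hinf : pqSep <:+: l := (PySem.Chars.find_nonneg_iff l pqSep).mp h
  have h3 := hinf.length_le
  simp only [pqSep, List.length_cons, List.length_nil] at h3
  simp only [List.length_drop]
  omega

theorem splX_ne_nil (l : List Char) : splX l ≠ [] := by
  rw [splX]; split <;> simp

theorem find_eq_nat (l : List Char) (n : Nat) (h1 : pqSep <+: l.drop n)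
    (h2 : ∀ i < n, ¬ pqSep <+: l.drop i) : PySem.Chars.find l pqSep = n := by
  have hinf : pqSep <:+: l := h1.isInfix.trans (List.drop_suffix n l).isInfix
  have hnn : 0 ≤ PySem.Chars.find l pqSep := (PySem.Chars.find_nonneg_iff l pqSep).mpr hinf
  obtain ⟨hp, hmin⟩ := PySem.Chars.find_spec hnn
  set m := (PySem.Chars.find l pqSep).toNat with hm
  have : m = n := by
    rcases lt_trichotomy m n with h | h | h
    · exact absurd hp (h2 m h)
    · exact h
    · exact absurd h1 (hmin n h)
  omega

theorem go_clean : ∀ (a : List Char) (l cur : List Char) (acc : List (List Char)) (fuel : Nat),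
    (∀ i < a.length, ¬ pqSep <+: (a ++ l).drop i) →
    PySem.Chars.splitOn.go pqSep (fuel + a.length) (a ++ l) cur acc
      = PySem.Chars.splitOn.go pqSep fuel l (a.reverse ++ cur) acc := by
  intro a
  induction a with
  | nil => intro l cur acc fuel _; simp
  | cons c a' ih =>
    intro l cur acc fuel h
    have h0 : ¬ pqSep <+: (c :: (a' ++ l)) := by
      have := h 0 (by simp)
      simpa using this
    have step := go_cons_noprefix c (a' ++ l) cur acc (fuel + a'.length) h0
    calc PySem.Chars.splitOn.go pqSep (fuel + (c :: a').length) ((c :: a') ++ l) cur acc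
        = PySem.Chars.splitOn.go pqSep (fuel + a'.length + 1) (c :: (a' ++ l)) cur acc := by
          have : fuel + (c :: a').length = fuel + a'.length + 1 := by simp; omega
          rw [this]; rfl
      _ = PySem.Chars.splitOn.go pqSep (fuel + a'.length) (a' ++ l) (c :: cur) acc := step
      _ = PySem.Chars.splitOn.go pqSep fuel l (a'.reverse ++ (c :: cur)) acc := by
          apply ih
          intro i hi
          have := h (i + 1) (by simp; omega)
          simpa using this
      _ = PySem.Chars.splitOn.go pqSep fuel l ((c :: a').reverse ++ cur) acc := by
          simp

theorem not_sep_prefix_drop_of_not_infix {l : List Char} (h : ¬ pqSep <:+: l) :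
    ∀ i, ¬ pqSep <+: l.drop i := by
  intro i hp
  exact h (hp.isInfix.trans (List.drop_suffix i l).isInfix)

theorem go_eq_splX : ∀ (N : Nat) (l cur : List Char) (acc : List (List Char)) (fuel : Nat),
    l.length ≤ N → l.length + 1 ≤ fuel →
    PySem.Chars.splitOn.go pqSep fuel l cur acc
      = acc.reverse ++ (cur.reverse ++ (splX l).headI) :: (splX l).tail := by
  intro N
  induction N with
  | zero =>
    intro l cur acc fuel hN hf
    have hl : l = [] := List.eq_nil_of_length_eq_zero (by omega)
    subst hl
    obtain ⟨f', rfl⟩ : ∃ f', fuel = f' + 1 := ⟨fuel - 1, by omega⟩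
    rw [go_nil]
    have : ¬ (0 : Int) ≤ PySem.Chars.find [] pqSep := by
      have : PySem.Chars.find [] pqSep = -1 := by
        rw [PySem.Chars.find_eq_neg_one_iff]
        intro h
        have := h.length_le
        simp [pqSep] at this
      omega
    rw [splX, dif_neg this]
    simp
  | succ N ih =>
    intro l cur acc fuel hN hf
    by_cases h : 0 ≤ PySem.Chars.find l pqSep
    · -- an occurrence: l = take n l ++ pqSep ++ l₂
      obtain ⟨hp, hmin⟩ := PySem.Chars.find_spec h
      set n := (PySem.Chars.find l pqSep).toNat with hn
      have hn3 : n + 3 ≤ l.length := by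
        have := hp.length_le
        simp only [pqSep, List.length_cons, List.length_nil, List.length_drop] at this
        have hfl := PySem.Chars.find_le_length l pqSep
        omega
      have hsplX : splX l = l.take n :: splX (l.drop (n + 3)) := by
        rw [splX, dif_pos h]
      obtain ⟨f1, rfl⟩ : ∃ f1, fuel = f1 + n := ⟨fuel - n, by omega⟩
      have hdec : l = l.take n ++ l.drop n := (List.take_append_drop n l).symm
      have hclean : ∀ i < (l.take n).length, ¬ pqSep <+: ((l.take n) ++ l.drop n).drop i := by
        intro i hi
        rw [← hdec]
        exact hmin i (by simp at hi; omega)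
      have hlen : (l.take n).length = n := by simp; omega
      have e1 : PySem.Chars.splitOn.go pqSep (f1 + n) l cur acc
          = PySem.Chars.splitOn.go pqSep f1 (l.drop n) ((l.take n).reverse ++ cur) acc := by
        have hg := go_clean (l.take n) (l.drop n) cur acc f1 hclean
        rw [hlen] at hg
        rw [← hdec] at hg
        exact hg
      obtain ⟨f2, rfl⟩ : ∃ f2, f1 = f2 + 1 := ⟨f1 - 1, by omega⟩
      obtain ⟨c, rest, hcr⟩ : ∃ c rest, l.drop n = c :: rest := by
        rcases hdrop : l.drop n with _ | ⟨c, rest⟩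
        · exfalso; have := congrArg List.length hdrop; simp at this; omega
        · exact ⟨c, rest, rfl⟩
      have e2 : PySem.Chars.splitOn.go pqSep (f2 + 1) (l.drop n) ((l.take n).reverse ++ cur) acc
          = PySem.Chars.splitOn.go pqSep f2 (l.drop (n + 3)) []
              ((cur.reverse ++ l.take n) :: acc) := by
        rw [hcr] at hp ⊢
        rw [go_prefix c rest _ acc f2 hp]
        have : (c :: rest).drop 3 = l.drop (n + 3) := by
          rw [← hcr, List.drop_drop]
        rw [this]
        simp
      have e3 := ih (l.drop (n + 3)) [] ((cur.reverse ++ l.take n) :: acc) f2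
        (by simp; omega) (by simp; omega)
      rw [e1, e2, e3, hsplX]
      rcases hsx : splX (l.drop (n + 3)) with _ | ⟨s1, ss⟩
      · exact absurd hsx (splX_ne_nil _)
      · simp
    · -- no occurrence
      have hne : PySem.Chars.find l pqSep = -1 := by
        have := PySem.Chars.neg_one_le_find l pqSep; omega
      have hni : ¬ pqSep <:+: l := (PySem.Chars.find_eq_neg_one_iff l pqSep).mp hne
      rw [splX, dif_neg h]
      obtain ⟨f1, rfl⟩ : ∃ f1, fuel = f1 + l.length := ⟨fuel - l.length, by omega⟩
      have := go_clean l [] cur acc f1 (by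
        intro i hi
        simp only [List.append_nil]
        exact not_sep_prefix_drop_of_not_infix hni i)
      rw [List.append_nil] at this
      rw [this]
      obtain ⟨f2, rfl⟩ : ∃ f2, f1 = f2 + 1 := ⟨f1 - 1, by omega⟩
      rw [go_nil]
      simp

theorem splitOn_eq_splX (l : List Char) : PySem.Chars.splitOn l pqSep = splX l := by
  have := go_eq_splX l.length l [] [] (l.length + 1) le_rfl le_rfl
  unfold PySem.Chars.splitOn
  rw [this]
  rcases hsx : splX l with _ | ⟨s1, ss⟩
  · exact absurd hsx (splX_ne_nil _)
  · simp

theorem infix_cons_qm (r : List Char) : pqSep <:+: ('?' :: r) ↔ pqSep <:+: r := by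
  constructor
  · intro h
    obtain ⟨t, ht, hs⟩ := List.infix_iff_prefix_suffix.mp h
    rcases hs with ⟨u, hu⟩
    -- t is a suffix of '?'::r
    rcases u with _ | ⟨c, u'⟩
    · -- t = '?'::r, pqSep <+: '?'::r: impossible head
      simp at hu; subst hu
      rw [sep_prefix_iff] at ht
      simp at ht
    · have : t <:+ r := by
        have := congrArg List.tail hu
        simp at this
        exact ⟨u', this⟩
      exact List.infix_iff_prefix_suffix.mpr ⟨t, ht, this⟩
  · intro h
    exact h.trans (List.suffix_cons '?' r).isInfix
theorem splX_cons_qm (r : List Char) :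
    splX ('?' :: r) = ('?' :: (splX r).headI) :: (splX r).tail := by
  by_cases h : 0 ≤ PySem.Chars.find r pqSep
  · obtain ⟨hp, hmin⟩ := PySem.Chars.find_spec h
    set n := (PySem.Chars.find r pqSep).toNat with hn
    have hfind : PySem.Chars.find ('?' :: r) pqSep = (n + 1 : Nat) := by
      apply find_eq_nat
      · simpa using hp
      · intro i hi
        match i with
        | 0 =>
          rw [sep_prefix_iff]; simp
        | j + 1 =>
          simp only [List.drop_succ_cons]
          exact hmin j (by omega)
    have h' : 0 ≤ PySem.Chars.find ('?' :: r) pqSep := by rw [hfind]; positivity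
    rw [splX, dif_pos h', hfind]
    simp only [Int.toNat_natCast]
    have hd : (n + 1) + 3 = (n + 3) + 1 := by omega
    rw [hd]
    simp only [List.take_succ_cons, List.drop_succ_cons]
    conv_rhs => rw [splX, dif_pos h]
    simp [hn]
  · have hne : PySem.Chars.find r pqSep = -1 := by
      have := PySem.Chars.neg_one_le_find r pqSep; omega
    have hni : ¬ pqSep <:+: r := (PySem.Chars.find_eq_neg_one_iff r pqSep).mp hne
    have hni' : ¬ pqSep <:+: ('?' :: r) := fun hc => hni ((infix_cons_qm r).mp hc)
    have h2 : ¬ 0 ≤ PySem.Chars.find ('?' :: r) pqSep := by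
      have := (PySem.Chars.find_eq_neg_one_iff ('?' :: r) pqSep).mpr hni'
      omega
    rw [splX, dif_neg h2, splX, dif_neg h]
    simp [List.headI, List.tail]

theorem clean_qm (p r old : List Char)
    (h : ∀ i < p.length, ¬ pqSep <+: (p ++ old).drop i) :
    ∀ i < p.length, ¬ pqSep <+: (p ++ '?' :: r).drop i := by
  intro i hi hpre
  rw [sep_prefix_iff] at hpre
  simp only [List.getElem?_drop] at hpre
  obtain ⟨h0, h1, h2⟩ := hpre
  by_cases hc : i + 2 < p.length
  · apply h i hi
    rw [sep_prefix_iff]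
    simp only [List.getElem?_drop]
    rw [List.getElem?_append_left (by omega)] at h0 h1 h2
    refine ⟨?_, ?_, ?_⟩ <;> rw [List.getElem?_append_left (by omega)] <;> assumption
  · -- p.length ∈ {i+1, i+2}: the window covers the '?'
    have hq : (p ++ '?' :: r)[p.length]? = some '?' := by
      rw [List.getElem?_append_right le_rfl]
      simp
    rcases (by omega : p.length = i + 1 ∨ p.length = i + 2) with he | he
    · rw [he] at hq; rw [hq] at h1; simp at h1
    · rw [he] at hq; rw [hq] at h2; simp at h2

theorem join_empty_eq_flatten (ls : List (List Char)) :
    PySem.Chars.join [] ls = ls.flatten := by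
  unfold PySem.Chars.join
  induction ls with
  | nil => rfl
  | cons x xs ih =>
    cases xs with
    | nil => simp [List.intercalate]
    | cons y ys =>
      rw [List.flatten_cons, ← ih]
      simp [List.intercalate, List.intersperse]

theorem altGo_eq (d : PySem.Dict String Int) : ∀ (rest : List String),
    ((prepQueryAltGo d rest).1.map String.toList).flatten
        = (rebuildC d (rest.map String.toList)).1 ∧
    (prepQueryAltGo d rest).2 = (rebuildC d (rest.map String.toList)).2 := by
  intro rest
  induction rest using prepQueryAltGo.induct d with
  | case1 key seg rest hnone =>
    simp [prepQueryAltGo, rebuildC, hnone]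
  | case2 key seg rest v hv parts vals hpv ih =>
    obtain ⟨ih1, ih2⟩ := ih
    simp only [prepQueryAltGo, hv, hpv, List.map_cons, rebuildC, String.ofList_toList]
    rw [hpv] at ih1 ih2
    simp only [List.flatten_cons] at ih1 ⊢
    exact ⟨by simpa using ih1, by simpa using ih2⟩
  | case3 rest h =>
    rcases rest with _ | ⟨k, _ | ⟨s, r⟩⟩
    · simp [prepQueryAltGo, rebuildC]
    · simp [prepQueryAltGo, rebuildC]
    · exact absurd rfl (h k s r)

theorem sepToList : ("$%$" : String).toList = pqSep := rfl

theorem main_loop : ∀ (N : Nat) (r a : List Char) (d : PySem.Dict String Int)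
    (acc : List Int) (fuel : Nat),
    r.length ≤ N → r.length + 1 ≤ fuel →
    (∀ i < a.length, ¬ pqSep <+: (a ++ r).drop i) →
    (splX r).length % 2 = 1 →
    (∀ i < (splX r).length, i % 2 = 1 →
      (d.get? (String.ofList ((splX r).getD i []))).isSome = true) →
    prepQueryLoop d fuel (String.ofList (a ++ r)) (a.length : Int) acc
      = (String.ofList (a ++ (splX r).headI ++ (rebuildC d (splX r).tail).1),
         acc ++ (rebuildC d (splX r).tail).2) := by
  intro N
  induction N with
  | zero =>
    intro r a d acc fuel hN hf hclean hodd hkeys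
    have hr : r = [] := List.eq_nil_of_length_eq_zero (by omega)
    subst hr
    obtain ⟨f, rfl⟩ : ∃ f, fuel = f + 1 := ⟨fuel - 1, by omega⟩
    have hfind : PySem.Chars.find ([] : List Char) pqSep = -1 := by
      rw [PySem.Chars.find_eq_neg_one_iff]
      intro h
      have := h.length_le
      simp [pqSep] at this
    have hs : PySem.Str.findFrom (String.ofList (a ++ [])) "$%$" (a.length : Int) = -1 := by
      rw [PySem.Str.findFrom_eq, sepToList, String.toList_ofList]
      rw [PySem.Chars.findFrom_natCast _ _ a.length (by simp)]
      rw [List.drop_left, hfind]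
      simp
    have hsplX : splX [] = [[]] := by
      rw [splX, dif_neg (by rw [hfind]; omega)]
    simp only [prepQueryLoop, hs, hsplX]
    simp [rebuildC]
  | succ N ih =>
    intro r a d acc fuel hN hf hclean hodd hkeys
    obtain ⟨f, rfl⟩ : ∃ f, fuel = f + 1 := ⟨fuel - 1, by omega⟩
    by_cases h1 : 0 ≤ PySem.Chars.find r pqSep
    · -- first delimiter found
      obtain ⟨hp, hmin⟩ := PySem.Chars.find_spec h1
      set n := (PySem.Chars.find r pqSep).toNat with hn
      have hfr : PySem.Chars.find r pqSep = (n : Int) := by omega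
      have hn3 : n + 3 ≤ r.length := by
        have := hp.length_le
        simp only [pqSep, List.length_cons, List.length_nil, List.length_drop] at this
        have := PySem.Chars.find_le_length r pqSep
        omega
      set r₂ := r.drop (n + 3) with hr₂
      have hdr : r.drop n = pqSep ++ r₂ := by
        obtain ⟨u, hu⟩ := hp
        have : u = r₂ := by
          have := congrArg (List.drop 3) hu
          simp only [List.drop_drop] at this
          rw [List.drop_append_of_le_length (by simp [pqSep])] at this
          simp [pqSep] at this
          rw [hr₂, ← this]
        rw [← this, hu]
      have hs : PySem.Str.findFrom (String.ofList (a ++ r)) "$%$" (a.length : Int)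
          = ((a.length + n : Nat) : Int) := by
        rw [PySem.Str.findFrom_eq, sepToList, String.toList_ofList]
        rw [PySem.Chars.findFrom_natCast _ _ a.length (by simp)]
        rw [List.drop_left, hfr]
        have : ¬ ((n : Int) = -1) := by omega
        rw [if_neg this]
        push_cast
        ring
      by_cases h2 : 0 ≤ PySem.Chars.find r₂ pqSep
      · obtain ⟨hp2, hmin2⟩ := PySem.Chars.find_spec h2
        set m := (PySem.Chars.find r₂ pqSep).toNat with hm
        have hfr2 : PySem.Chars.find r₂ pqSep = (m : Int) := by omega
        have hm3 : m + 3 ≤ r₂.length := by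
          have := hp2.length_le
          simp only [pqSep, List.length_cons, List.length_nil, List.length_drop] at this
          have := PySem.Chars.find_le_length r₂ pqSep
          omega
        have hr₂len : r₂.length = r.length - (n + 3) := by simp [hr₂]
        set r₃ := r₂.drop (m + 3) with hr₃
        have hdr2 : r₂.drop m = pqSep ++ r₃ := by
          obtain ⟨u, hu⟩ := hp2
          have : u = r₃ := by
            have := congrArg (List.drop 3) hu
            simp only [List.drop_drop] at this
            rw [List.drop_append_of_le_length (by simp [pqSep])] at this
            simp [pqSep] at this
            rw [hr₃, ← this]
          rw [← this, hu]
        -- splX decompositions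
        have hsplX2 : splX r₂ = r₂.take m :: splX r₃ := by
          rw [splX, dif_pos h2, ← hm, hr₃]
        have hsplX : splX r = r.take n :: r₂.take m :: splX r₃ := by
          rw [splX, dif_pos h1, ← hn, ← hr₂, hsplX2]
        obtain ⟨h₃, t₃, hsx3⟩ : ∃ h₃ t₃, splX r₃ = h₃ :: t₃ := by
          rcases hx : splX r₃ with _ | ⟨h₃, t₃⟩
          · exact absurd hx (splX_ne_nil _)
          · exact ⟨h₃, t₃, rfl⟩
        -- the end delimiter
        have he : PySem.Str.findFrom (String.ofList (a ++ r)) "$%$"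
            (((a.length + n : Nat) : Int) + 3) = ((a.length + n + 3 + m : Nat) : Int) := by
          rw [PySem.Str.findFrom_eq, sepToList, String.toList_ofList]
          have hc : ((a.length + n : Nat) : Int) + 3 = ((a.length + (n + 3) : Nat) : Int) := by
            push_cast; ring
          rw [hc, PySem.Chars.findFrom_natCast _ _ _ (by simp; omega)]
          have hd : (a ++ r).drop (a.length + (n + 3)) = r₂ := by
            rw [← List.drop_drop, List.drop_left, hr₂]
          rw [hd, hfr2]
          rw [if_neg (by omega)]
          push_cast; ring
        -- the key
        have hkey : PySem.Str.slice (String.ofList (a ++ r))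
            (some (((a.length + n : Nat) : Int) + 3)) (some ((a.length + n + 3 + m : Nat) : Int))
            = String.ofList (r₂.take m) := by
          apply String.toList_inj.mp
          rw [PySem.Str.toList_slice, String.toList_ofList, String.toList_ofList]
          rw [PySem.Chars.slice_eq_listSlice]
          have hc : ((a.length + n : Nat) : Int) + 3 = ((a.length + n + 3 : Nat) : Int) := by
            push_cast; ring
          rw [hc, PySem.List.slice_natCast]
          have hd : (a ++ r).drop (a.length + n + 3) = r₂ := by
            rw [show a.length + n + 3 = a.length + (n + 3) by omega, ← List.drop_drop,
              List.drop_left, hr₂]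
          rw [hd]
          congr 1
          omega
        -- the key is present
        have hk1 := hkeys 1 (by rw [hsplX]; simp) (by norm_num)
        rw [hsplX] at hk1
        simp only [List.getD_cons_succ, List.getD_cons_zero] at hk1
        obtain ⟨v, hv⟩ := Option.isSome_iff_exists.mp hk1
        -- the new string
        have hnew : PySem.Str.slice (String.ofList (a ++ r)) none (some ((a.length + n : Nat) : Int))
              ++ "?" ++ PySem.Str.slice (String.ofList (a ++ r))
                  (some (((a.length + n + 3 + m : Nat) : Int) + 3)) none
            = String.ofList ((a ++ r.take n) ++ '?' :: r₃) := by
          apply String.toList_inj.mp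
          rw [String.toList_append, String.toList_append]
          rw [PySem.Str.toList_slice, PySem.Str.toList_slice, String.toList_ofList,
            String.toList_ofList]
          rw [PySem.Chars.slice_eq_listSlice, PySem.Chars.slice_eq_listSlice]
          rw [PySem.List.slice_to_natCast]
          have hc : ((a.length + n + 3 + m : Nat) : Int) + 3 = ((a.length + n + m + 6 : Nat) : Int) := by
            push_cast; ring
          rw [hc, PySem.List.slice_from_natCast]
          have h1' : (a ++ r).take (a.length + n) = a ++ r.take n := by
            rw [List.take_append]
            simp
          have h2' : (a ++ r).drop (a.length + n + m + 6) = r₃ := by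
            rw [show a.length + n + m + 6 = a.length + (n + 3 + (m + 3)) by omega,
              ← List.drop_drop, List.drop_left, ← List.drop_drop, ← hr₂, hr₃]
          rw [h1', h2']
          simp
        -- clean for the recursive call
        have hPO : ∀ i < (a ++ r.take n).length, ¬ pqSep <+: ((a ++ r.take n) ++ (pqSep ++ r₂)).drop i := by
          have hback : (a ++ r.take n) ++ (pqSep ++ r₂) = a ++ r := by
            rw [List.append_assoc, ← hdr, List.take_append_drop]
          rw [hback]
          intro i hi
          simp only [List.length_append, List.length_take] at hi
          by_cases hia : i < a.length
          · exact hclean i hia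
          · obtain ⟨j, rfl⟩ : ∃ j, i = a.length + j := ⟨i - a.length, by omega⟩
            have : (a ++ r).drop (a.length + j) = r.drop j := by
              rw [← List.drop_drop, List.drop_left]
            rw [this]
            exact hmin j (by omega)
        have hclean' := clean_qm (a ++ r.take n) r₃ (pqSep ++ r₂) hPO
        -- splX of the new remainder
        have hsplX' : splX ('?' :: r₃) = ('?' :: h₃) :: t₃ := by
          rw [splX_cons_qm, hsx3]
          simp [List.headI, List.tail]
        -- apply the induction hypothesis
        have hstart : ((a.length + n : Nat) : Int) = ((a ++ r.take n).length : Int) := by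
          simp
          omega
        have hih := ih ('?' :: r₃) (a ++ r.take n) d (acc ++ [v]) f
          (by simp [hr₃, hr₂] at *; omega)
          (by simp [hr₃, hr₂] at *; omega)
          hclean'
          (by
            rw [hsplX']
            rw [hsplX, hsx3] at hodd
            simp only [List.length_cons] at hodd ⊢
            omega)
          (by
            intro i hilen hiodd
            rw [hsplX'] at hilen ⊢
            obtain ⟨j, rfl⟩ : ∃ j, i = j + 1 := ⟨i - 1, by omega⟩
            simp only [List.getD_cons_succ]
            have := hkeys (j + 3) (by rw [hsplX, hsx3]; simp at hilen ⊢; omega) (by omega)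
            rw [hsplX, hsx3] at this
            simpa only [List.getD_cons_succ] using this)
        -- assemble
        simp only [prepQueryLoop, hs, he, hkey, hnew, hv]
        rw [if_neg (by omega)]
        rw [hstart]
        rw [hih, hsplX, hsplX', hsx3]
        simp only [List.headI, List.tail, rebuildC, hv]
        simp [List.append_assoc]
      · -- no closing delimiter: contradicts the odd-segments precondition
        exfalso
        have hsplX2 : splX r₂ = [r₂] := by
          rw [splX, dif_neg h2]
        have hsplX : splX r = r.take n :: splX r₂ := by
          rw [splX, dif_pos h1, ← hn, ← hr₂]
        rw [hsplX, hsplX2] at hodd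
        simp at hodd
    · -- no delimiter: the loop stops
      have hfind : PySem.Chars.find r pqSep = -1 := by
        have := PySem.Chars.neg_one_le_find r pqSep; omega
      have hs : PySem.Str.findFrom (String.ofList (a ++ r)) "$%$" (a.length : Int) = -1 := by
        rw [PySem.Str.findFrom_eq, sepToList, String.toList_ofList]
        rw [PySem.Chars.findFrom_natCast _ _ a.length (by simp)]
        rw [List.drop_left, hfind]
        simp
      have hsplX : splX r = [r] := by
        rw [splX, dif_neg (by rw [hfind]; omega)]
      simp only [prepQueryLoop, hs, hsplX]
      simp [rebuildC]

-- ===== VERDICT (by name: the statement is the Claim_ definition above) =====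
theorem prepare_query_spec : Claim_equal_prepare_query := by
  unfold Claim_equal_prepare_query
  intro query params _hdom hpre
  unfold Spec_prepare_query
  unfold Pre_prepare_query at hpre
  rw [splitOn_eq_splX] at hpre
  obtain ⟨hodd, hkeys⟩ := hpre
  set d := PySem.Dict.ofList params with hd
  -- A's loop, through the main invariant
  have hmain := main_loop query.toList.length query.toList [] d [] (query.toList.length + 1)
    le_rfl le_rfl (by simp) hodd hkeys
  simp only [List.nil_append, List.length_nil, Nat.cast_zero,
    String.ofList_toList] at hmain
  -- B's split
  have hsome : PySem.Chars.split? query.toList pqSep = some (splX query.toList) := by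
    rw [← splitOn_eq_splX]
    simp [PySem.Chars.split?, pqSep]
  have hmap := PySem.Str.split?_map query "$%$"
  rw [sepToList, hsome] at hmap
  rcases hq : PySem.Str.split? query "$%$" with _ | segs
  · rw [hq] at hmap; simp at hmap
  · rw [hq] at hmap
    simp only [Option.map_some, Option.some.injEq] at hmap
    obtain ⟨s0, rest, rfl⟩ : ∃ s0 rest, segs = s0 :: rest := by
      rcases segs with _ | ⟨s0, rest⟩
      · exfalso; apply splX_ne_nil query.toList; rw [← hmap]; rfl
      · exact ⟨s0, rest, rfl⟩
    have hhead : (splX query.toList).headI = s0.toList := by rw [← hmap]; rfl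
    have htail : (splX query.toList).tail = rest.map String.toList := by rw [← hmap]; rfl
    have hlen : (s0 :: rest).length = (splX query.toList).length := by
      rw [← hmap]; simp
    have hnot2 : ¬ ((s0 :: rest).length % 2 = 0) := by omega
    obtain ⟨hg1, hg2⟩ := altGo_eq d rest
    rcases hgo : prepQueryAltGo d rest with ⟨parts, vals⟩
    rw [hgo] at hg1 hg2
    unfold prepare_query prepare_query_alt
    rw [hq]
    simp only [← hd, hgo, if_neg hnot2]
    rw [hmain]
    refine Prod.ext ?_ ?_ <;> dsimp only
    · apply String.toList_inj.mp
      rw [PySem.Str.toList_join, String.toList_ofList]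
      rw [show ("" : String).toList = [] from rfl, join_empty_eq_flatten]
      simp only [List.map_cons, List.flatten_cons]
      dsimp only at hg1
      rw [hhead, htail, ← hg1]
    · dsimp only at hg2
      rw [hg2, htail]
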